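-- pv_equiv track=rewrite | github.com/Emoty-9s/VQGRS | fmp_universe_fetch.py | _estimates_rows_on_or_after
-- ===== SOURCE A (Python) =====
-- from typing import Any, Dict, List, Optional, Set, Tuple
--
-- def pick_date10(d: Dict[str, Any], keys: List[str]) -> Optional[str]:
--     """Date only: return first 10 chars (YYYY-MM-DD). Use for date fields only."""
--     for k in keys:
--         v = d.get(k)
--         if v is None:
--             continue
--         s = str(v).strip()
--         if s:
--             return s[:10]
--     return None
--
-- def _estimates_rows_on_or_after(rows: List[Dict[str, Any]], as_of: str) -> List[Dict[str, Any]]: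
--     """Filter rows with date >= as_of (YYYY-MM-DD), sort by date ascending. Drops None/empty dates."""
--     as_of_10 = str(as_of).strip()[:10] if as_of else ""
--     if not as_of_10:
--         return list(rows) if rows else []
--     dated: List[Tuple[str, Dict[str, Any]]] = []
--     for r in rows:
--         d = pick_date10(r, ["date", "fiscalDateEnding", "fillingDate"])
--         if not d:
--             continue
--         if d >= as_of_10:
--             dated.append((d, r))
--     dated.sort(key=lambda x: x[0])
--     return [r for _, r in dated]
-- ===== SOURCE B (Python) =====
-- from bisect import bisect_left
-- from typing import Any, Dict, List, Optional
--
-- _DATE_KEYS = ("date", "fiscalDateEnding", "fillingDate")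
--
-- def _date_of(r: Dict[str, Any]) -> Optional[str]:
--     return next(
--         (str(r[k]).strip()[:10] for k in _DATE_KEYS
--          if r.get(k) is not None and str(r[k]).strip()),
--         None,
--     )
--
-- def _estimates_rows_on_or_after(rows: List[Dict[str, Any]], as_of: str) -> List[Dict[str, Any]]:
--     as_of_10 = str(as_of).strip()[:10] if as_of else ""
--     if not as_of_10:
--         return list(rows) if rows else []
--     # decorate every dated row, sort them all, then cut at as_of_10 by binary search
--     pairs = [(d, r) for r in rows if (d := _date_of(r)) is not None]
--     pairs.sort(key=lambda t: t[0])
--     dates = [d for d, _ in pairs]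
--     return [r for _, r in pairs[bisect_left(dates, as_of_10):]]
-- ===== Notes on version B (the rewrite author's own statement) =====
-- stated objective: alternative
-- what changed: Instead of testing each row against the threshold before sorting, B decorates ALL dated rows via a comprehension with a findSome?-style date extractor, sorts them, and cuts the suffix with bisect_left on the sorted dates.
import Mathlib
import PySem

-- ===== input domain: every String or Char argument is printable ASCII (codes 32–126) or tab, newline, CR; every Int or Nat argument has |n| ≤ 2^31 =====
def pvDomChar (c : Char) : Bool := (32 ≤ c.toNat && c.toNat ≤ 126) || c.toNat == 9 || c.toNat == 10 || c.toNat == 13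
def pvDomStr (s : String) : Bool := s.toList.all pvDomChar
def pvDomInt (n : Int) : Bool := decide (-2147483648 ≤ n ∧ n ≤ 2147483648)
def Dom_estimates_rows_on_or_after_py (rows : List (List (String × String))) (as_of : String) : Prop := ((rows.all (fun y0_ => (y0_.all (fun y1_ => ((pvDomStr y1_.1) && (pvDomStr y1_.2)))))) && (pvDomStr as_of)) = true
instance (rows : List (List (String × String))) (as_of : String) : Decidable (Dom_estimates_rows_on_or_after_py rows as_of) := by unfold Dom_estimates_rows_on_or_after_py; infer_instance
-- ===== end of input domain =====

-- B re-implements the same selection: it decorates ALL dated rows (findSome?-style date lookup,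
-- filterMap comprehension), sorts them once, and cuts off the suffix with bisect_left on the
-- sorted dates, instead of testing each row against the threshold before sorting
-- (alternative decomposition, same asymptotic cost; return values only, no mutation).

-- ===== PORT A =====
-- dict.get on the association-list row: first match
def rowGet (r : List (String × String)) (k : String) : Option String :=
  (r.find? (fun p => p.1 == k)).map (·.2)

-- literal port of pick_date10(d, keys)
def pickDate10 (r : List (String × String)) : List String → Option String
  | [] => none
  | k :: ks =>
    match rowGet r k with
    | none => pickDate10 r ks
    | some v =>
      let s := PySem.Str.strip v
      if s = "" then pickDate10 r ks else some (PySem.Str.slice s none (some 10))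

def estimates_rows_on_or_after_py (rows : List (List (String × String))) (as_of : String) : List (List (String × String)) :=
  let as_of_10 := if as_of = "" then "" else PySem.Str.slice (PySem.Str.strip as_of) none (some 10)
  if as_of_10 = "" then rows
  else
    let dated := rows.foldl (fun acc r =>
      match pickDate10 r ["date", "fiscalDateEnding", "fillingDate"] with
      | none => acc
      | some d => if d = "" then acc else if as_of_10 ≤ d then acc ++ [(d, r)] else acc) []
    (PySem.List.sorted dated (fun x => x.1) false).map (·.2)

-- ===== PORT B =====
-- B's date extractor: first key whose stripped value is nonempty, as a findSome? over the keys
def dateOfB (r : List (String × String)) : Option String :=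
  ["date", "fiscalDateEnding", "fillingDate"].findSome? (fun k =>
    (r.lookup k).bind (fun v =>
      let s := PySem.Str.strip v
      if s = "" then none else some (PySem.Str.slice s none (some 10))))

def estimates_rows_on_or_after_py_alt (rows : List (List (String × String))) (as_of : String) : List (List (String × String)) :=
  let as_of_10 := if as_of = "" then "" else PySem.Str.slice (PySem.Str.strip as_of) none (some 10)
  if as_of_10 = "" then rows
  else
    let pairs := PySem.List.sorted
      (rows.filterMap (fun r => (dateOfB r).map (fun d => (d, r)))) (fun t => t.1) false
    let dates := pairs.map (fun t => t.1)
    (PySem.List.slice pairs (some ((PySem.List.bisectLeft dates as_of_10 : Nat) : Int)) none).map (fun t => t.2)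

-- ===== PRECONDITION & SPEC =====
def Spec_estimates_rows_on_or_after_py (rows : List (List (String × String))) (as_of : String) (out : List (List (String × String))) : Prop := out = estimates_rows_on_or_after_py_alt rows as_of
instance (rows : List (List (String × String))) (as_of : String) (out : List (List (String × String))) : Decidable (Spec_estimates_rows_on_or_after_py rows as_of out) := by unfold Spec_estimates_rows_on_or_after_py; infer_instance

-- ===== CLAIM (what is proved, stated in full; the proofs are below) =====
def Claim_equal_estimates_rows_on_or_after_py : Prop := ∀ (rows : List (List (String × String))) (as_of : String), Dom_estimates_rows_on_or_after_py rows as_of → Spec_estimates_rows_on_or_after_py rows as_of (estimates_rows_on_or_after_py rows as_of)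

-- ===== LEMMAS AND PROOFS =====

def dateKeys : List String := ["date", "fiscalDateEnding", "fillingDate"]

-- the per-row contribution of A's loop (date kept, nonempty, on or after the threshold)
def rowContribA (a : String) (r : List (String × String)) : List (String × List (String × String)) :=
  match pickDate10 r dateKeys with
  | none => []
  | some d => if d = "" then [] else if a ≤ d then [(d, r)] else []

-- the per-row contribution of B's comprehension (every dated row)
def rowContribB (r : List (String × String)) : List (String × List (String × String)) :=
  match pickDate10 r dateKeys with
  | none => []
  | some d => [(d, r)]

-- association-list lookup agrees with A's find?-based get
theorem lookup_eq_rowGet (r : List (String × String)) (k : String) :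
    r.lookup k = rowGet r k := by
  induction r with
  | nil => simp [rowGet]
  | cons p r ih =>
    by_cases h : k = p.1
    · simp [rowGet, List.lookup, List.find?, h]
    · have h1 : (k == p.1) = false := by simpa using h
      have h2 : (p.1 == k) = false := by simpa using (fun he => h he.symm)
      simp [rowGet, List.lookup, List.find?, h1, h2, ih]

-- B's findSome?-style extractor computes exactly A's pick_date10
theorem dateOfB_eq_pick (r : List (String × String)) :
    dateOfB r = pickDate10 r dateKeys := by
  unfold dateOfB dateKeys
  have key : ∀ ks : List String,
      ks.findSome? (fun k =>
        (r.lookup k).bind (fun v =>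
          let s := PySem.Str.strip v
          if s = "" then none else some (PySem.Str.slice s none (some 10)))) =
      pickDate10 r ks := by
    intro ks
    induction ks with
    | nil => simp [pickDate10]
    | cons k ks ih =>
      rw [List.findSome?_cons]
      rw [lookup_eq_rowGet]
      unfold pickDate10
      cases hv : rowGet r k with
      | none => simpa using ih
      | some v =>
        simp only [Option.bind_some]
        by_cases hs : PySem.Str.strip v = ""
        · simpa [hs] using ih
        · simp [hs]
  exact key _

-- B's comprehension builds the flat map of its per-row contributions
theorem contribB_eq (r : List (String × String)) :
    rowContribB r = ((dateOfB r).map (fun d => (d, r))).toList := by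
  rw [dateOfB_eq_pick]
  unfold rowContribB
  cases pickDate10 r dateKeys <;> simp

theorem filterMapB_eq_flatMap (rows : List (List (String × String))) :
    rows.filterMap (fun r => (dateOfB r).map (fun d => (d, r))) =
    rows.flatMap rowContribB := by
  induction rows with
  | nil => simp
  | cons r rows ih =>
    rw [List.filterMap_cons, List.flatMap_cons, ih, contribB_eq]
    cases dateOfB r <;> simp

-- pick_date10 never returns the empty string
theorem pickDate10_ne_empty (r : List (String × String)) (ks : List String) (d : String)
    (h : pickDate10 r ks = some d) : d ≠ "" := by
  induction ks with
  | nil => simp [pickDate10] at h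
  | cons k ks ih =>
    unfold pickDate10 at h
    cases hv : rowGet r k with
    | none => rw [hv] at h; exact ih h
    | some v =>
      rw [hv] at h
      simp only at h
      by_cases hs : PySem.Str.strip v = ""
      · rw [if_pos hs] at h; exact ih h
      · rw [if_neg hs] at h
        obtain ⟨rfl⟩ : PySem.Str.slice (PySem.Str.strip v) none (some 10) = d :=
          Option.some.inj h
        intro hd
        have h2 := congrArg String.toList hd
        simp [pysem] at h2
        have h3 : (PySem.Str.strip v).toList = [] := by simp [pysem, h2]
        exact hs (String.toList_eq_nil_iff.mp h3)

-- filter with an upward-closed predicate commutes with insertBy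
theorem filter_insertBy {α : Type} (p : α → Bool) (before : α → α → Bool) (x : α) (ys : List α)
    (hx : ∀ y, p x = true → p y = false → before x y = false) :
    (PySem.List.insertBy before x ys).filter p =
      if p x then PySem.List.insertBy before x (ys.filter p) else ys.filter p := by
  induction ys with
  | nil => cases hpx : p x <;> simp [PySem.List.insertBy, hpx]
  | cons y ys ih =>
    cases hb : before x y with
    | true =>
      cases hpx : p x with
      | true =>
        have hpy : p y = true := by
          cases hpy : p y
          · have := hx y hpx hpy; rw [hb] at this; exact absurd this (by simp)
          · rfl
        simp [PySem.List.insertBy, hb, hpx, hpy]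
      | false =>
        simp [PySem.List.insertBy, hb, hpx]
    | false =>
      cases hpx : p x with
      | true =>
        cases hpy : p y with
        | true => simp [PySem.List.insertBy, hb, hpx, hpy, ih]
        | false => simp [PySem.List.insertBy, hb, hpx, hpy, ih]
      | false =>
        simp [PySem.List.insertBy, hb, List.filter_cons, hpx, ih]

-- the key-lower-bound filter commutes with the insertion-sort fold
theorem filter_foldl_insertBy {α κ : Type} [LinearOrder κ] (key : α → κ) (a : κ) (xs : List α) :
    ∀ acc : List α,
    ((xs.foldl (fun acc x => PySem.List.insertBy (fun u v => decide (key u < key v)) x acc) acc).filter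
        (fun z => decide (a ≤ key z))) =
      (xs.filter (fun z => decide (a ≤ key z))).foldl
        (fun acc x => PySem.List.insertBy (fun u v => decide (key u < key v)) x acc)
        (acc.filter (fun z => decide (a ≤ key z))) := by
  induction xs with
  | nil => intro acc; simp
  | cons x xs ih =>
    intro acc
    rw [List.foldl_cons, ih, List.filter_cons]
    rw [filter_insertBy (fun z => decide (a ≤ key z)) (fun u v => decide (key u < key v)) x acc
      (by
        intro y hpx hpy
        simp only [decide_eq_true_eq] at hpx
        simp only [decide_eq_false_iff_not, not_le] at hpy
        exact decide_eq_false (not_lt.mpr (le_of_lt (lt_of_lt_of_le hpy hpx))))]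
    cases decide (a ≤ key x) <;> simp

-- filter commutes with the stable insertion sort when the predicate is a key lower bound
theorem filter_sorted {α κ : Type} [LinearOrder κ] (xs : List α) (key : α → κ) (a : κ) :
    (PySem.List.sorted xs key false).filter (fun z => decide (a ≤ key z)) =
      PySem.List.sorted (xs.filter (fun z => decide (a ≤ key z))) key false := by
  rw [PySem.List.sorted_eq_foldl_insertBy, PySem.List.sorted_eq_foldl_insertBy]
  simpa using filter_foldl_insertBy key a xs []

theorem pairwise_getElem_le {κ : Type} [LinearOrder κ] (xs : List κ) (hs : xs.Pairwise (· ≤ ·))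
    (i j : Nat) (hj : j < xs.length) (hij : i ≤ j) : xs[i]'(lt_of_le_of_lt hij hj) ≤ xs[j] := by
  rcases Nat.lt_or_ge i j with h | h
  · exact (List.pairwise_iff_getElem.mp hs) i j _ hj h
  · have : i = j := le_antisymm hij h
    subst this; exact le_refl _

theorem bisectLeftLoop_spec {κ : Type} [LinearOrder κ] (xs : List κ) (x : κ)
    (hs : xs.Pairwise (· ≤ ·)) :
    ∀ fuel lo hi, lo ≤ hi → hi ≤ xs.length → hi - lo ≤ fuel →
    (∀ j (hj : j < xs.length), j < lo → xs[j] < x) →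
    (∀ j (hj : j < xs.length), hi ≤ j → x ≤ xs[j]) →
    lo ≤ PySem.List.bisectLeftLoop xs x fuel lo hi ∧
    PySem.List.bisectLeftLoop xs x fuel lo hi ≤ hi ∧
    (∀ j (hj : j < xs.length), j < PySem.List.bisectLeftLoop xs x fuel lo hi → xs[j] < x) ∧
    (∀ j (hj : j < xs.length), PySem.List.bisectLeftLoop xs x fuel lo hi ≤ j → x ≤ xs[j]) := by
  intro fuel
  induction fuel with
  | zero =>
    intro lo hi h1 h2 h3 hlow hhigh
    have : lo = hi := by omega
    subst this
    exact ⟨le_refl _, le_refl _, hlow, hhigh⟩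
  | succ fuel ih =>
    intro lo hi h1 h2 h3 hlow hhigh
    by_cases hlh : lo < hi
    · have hmid : (lo + hi) / 2 < xs.length := by omega
      have hget : xs[(lo + hi) / 2]? = some (xs[(lo + hi) / 2]) := List.getElem?_eq_getElem hmid
      by_cases hy : xs[(lo + hi) / 2] < x
      · have hrec := ih ((lo + hi) / 2 + 1) hi (by omega) h2 (by omega)
          (by
            intro j hj hjlt
            exact lt_of_le_of_lt (pairwise_getElem_le xs hs j ((lo + hi) / 2) hmid (by omega)) hy)
          hhigh
        have heq : PySem.List.bisectLeftLoop xs x (fuel + 1) lo hi =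
            PySem.List.bisectLeftLoop xs x fuel ((lo + hi) / 2 + 1) hi := by
          simp [PySem.List.bisectLeftLoop, hlh, hget, hy]
        rw [heq]
        exact ⟨by omega, hrec.2.1, hrec.2.2.1, hrec.2.2.2⟩
      · have hrec := ih lo ((lo + hi) / 2) (by omega) (by omega) (by omega) hlow
          (by
            intro j hj hjge
            exact le_trans (not_lt.mp hy) (pairwise_getElem_le xs hs ((lo + hi) / 2) j hj hjge))
        have heq : PySem.List.bisectLeftLoop xs x (fuel + 1) lo hi =
            PySem.List.bisectLeftLoop xs x fuel lo ((lo + hi) / 2) := by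
          simp [PySem.List.bisectLeftLoop, hlh, hget, hy]
        rw [heq]
        exact ⟨hrec.1, by omega, hrec.2.2.1, hrec.2.2.2⟩
    · have : lo = hi := by omega
      subst this
      have heq : PySem.List.bisectLeftLoop xs x (fuel + 1) lo lo = lo := by
        simp [PySem.List.bisectLeftLoop]
      rw [heq]
      exact ⟨le_refl _, le_refl _, hlow, hhigh⟩

-- generic bisect_left spec (the library lemma PySem.List.bisectLeft_spec is stated for Int lists only)
theorem bisectLeft_spec' {κ : Type} [LinearOrder κ] (xs : List κ) (x : κ)
    (hs : xs.Pairwise (· ≤ ·)) :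
    PySem.List.bisectLeft xs x ≤ xs.length ∧
      (∀ j (hj : j < xs.length), j < PySem.List.bisectLeft xs x → xs[j] < x) ∧
      (∀ j (hj : j < xs.length), PySem.List.bisectLeft xs x ≤ j → x ≤ xs[j]) := by
  have h := bisectLeftLoop_spec xs x hs xs.length 0 xs.length (Nat.zero_le _) (le_refl _)
    (by omega) (by intro j hj hjlt; omega) (by intro j hj hjge; omega)
  exact ⟨h.2.1, h.2.2.1, h.2.2.2⟩

-- on a key-sorted list, dropping bisect_left-many elements is filtering by the key lower bound
theorem drop_bisectLeft_eq_filter {α κ : Type} [LinearOrder κ] (ys : List α) (key : α → κ) (a : κ)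
    (hs : ys.Pairwise (fun u v => key u ≤ key v)) :
    ys.drop (PySem.List.bisectLeft (ys.map key) a) = ys.filter (fun z => decide (a ≤ key z)) := by
  have hmap : (ys.map key).Pairwise (· ≤ ·) := List.Pairwise.map key (fun _ _ h => h) hs
  obtain ⟨hle, hlow, hhigh⟩ := bisectLeft_spec' (ys.map key) a hmap
  rw [List.length_map] at hle
  set r := PySem.List.bisectLeft (ys.map key) a with hr
  have hlow' : ∀ j (hj : j < ys.length), j < r → key ys[j] < a := by
    intro j hj hjr
    have := hlow j (by simpa using hj) hjr
    simpa using this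
  have hhigh' : ∀ j (hj : j < ys.length), r ≤ j → a ≤ key ys[j] := by
    intro j hj hjr
    have := hhigh j (by simpa using hj) hjr
    simpa using this
  conv_rhs => rw [← List.take_append_drop r ys]
  rw [List.filter_append]
  have h1 : (ys.take r).filter (fun z => decide (a ≤ key z)) = [] := by
    rw [List.filter_eq_nil_iff]
    intro z hz
    obtain ⟨i, hi, hiz⟩ := List.mem_iff_getElem.mp hz
    rw [List.length_take] at hi
    have hgi : (ys.take r)[i]'(by rw [List.length_take]; exact hi) = ys[i]'(by omega) :=
      List.getElem_take
    rw [hgi] at hiz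
    subst hiz
    simp only [decide_eq_true_eq, not_le]
    exact hlow' i (by omega) (by omega)
  have h2 : (ys.drop r).filter (fun z => decide (a ≤ key z)) = ys.drop r := by
    rw [List.filter_eq_self]
    intro z hz
    obtain ⟨i, hi, hiz⟩ := List.mem_iff_getElem.mp hz
    rw [List.length_drop] at hi
    have hgi : (ys.drop r)[i]'(by rw [List.length_drop]; exact hi) = ys[r + i]'(by omega) :=
      List.getElem_drop
    rw [hgi] at hiz
    subst hiz
    simp only [decide_eq_true_eq]
    exact hhigh' (r + i) (by omega) (by omega)
  rw [h1, h2, List.nil_append]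

-- A's loop builds the flat map of its per-row contributions
theorem foldlA_eq_flatMap (a : String) (rows : List (List (String × String))) :
    rows.foldl (fun acc r =>
      match pickDate10 r ["date", "fiscalDateEnding", "fillingDate"] with
      | none => acc
      | some d => if d = "" then acc else if a ≤ d then acc ++ [(d, r)] else acc) [] =
    rows.flatMap (rowContribA a) := by
  have h := PySem.List.foldl_congr_mem
    (f := fun acc r =>
      match pickDate10 r ["date", "fiscalDateEnding", "fillingDate"] with
      | none => acc
      | some d => if d = "" then acc else if a ≤ d then acc ++ [(d, r)] else acc)
    (g := fun acc r => acc ++ rowContribA a r)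
    (l := rows) (init := ([] : List (String × List (String × String))))
    (by
      intro acc r _
      unfold rowContribA dateKeys
      cases hp : pickDate10 r ["date", "fiscalDateEnding", "fillingDate"] with
      | none => simp only [hp]; simp
      | some d => simp only [hp]; split_ifs <;> simp)
  rw [h, PySem.List.foldl_append_eq_flatMap]
  simp

-- A's dated list is the threshold filter of B's dated list
theorem flatMapA_eq_filter_flatMapB (a : String) (rows : List (List (String × String))) :
    rows.flatMap (rowContribA a) =
      (rows.flatMap rowContribB).filter (fun z => decide (a ≤ z.1)) := by
  rw [List.filter_flatMap]
  have hpt : ∀ r, rowContribA a r = (rowContribB r).filter (fun z => decide (a ≤ z.1)) := by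
    intro r
    unfold rowContribA rowContribB
    cases hp : pickDate10 r dateKeys with
    | none => simp
    | some d =>
      have hd : d ≠ "" := pickDate10_ne_empty r dateKeys d hp
      simp only []
      rw [if_neg hd]
      by_cases had : a ≤ d
      · simp [String.le_iff_toList_le.mp had]
      · simp only [if_neg had, List.filter_cons]
        rw [decide_eq_false had]
        simp
  have hfun : rowContribA a = fun r => (rowContribB r).filter (fun z => decide (a ≤ z.1)) :=
    funext hpt
  rw [hfun]

-- ===== VERDICT (by name: the statement is the Claim_ definition above) =====
theorem estimates_rows_on_or_after_py_spec : Claim_equal_estimates_rows_on_or_after_py := by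
  intro rows as_of _
  unfold Spec_estimates_rows_on_or_after_py
  unfold estimates_rows_on_or_after_py estimates_rows_on_or_after_py_alt
  by_cases ha : (if as_of = "" then "" else PySem.Str.slice (PySem.Str.strip as_of) none (some 10)) = ""
  · simp only [ha, reduceIte]
  · simp only [if_neg ha]
    set a := (if as_of = "" then "" else PySem.Str.slice (PySem.Str.strip as_of) none (some 10)) with hadef
    rw [foldlA_eq_flatMap a rows, filterMapB_eq_flatMap rows]
    rw [flatMapA_eq_filter_flatMapB a rows]
    rw [← filter_sorted (rows.flatMap rowContribB) (fun z => z.1) a]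
    rw [PySem.List.slice_from_natCast]
    rw [drop_bisectLeft_eq_filter (PySem.List.sorted (rows.flatMap rowContribB) (fun t => t.1) false)
      (fun t => t.1) a (PySem.List.sorted_pairwise _ _)]
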